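-- pv_equiv track=rewrite | github.com/JonnyIvan24/bici | resources/python/leer.py | valores
-- ===== SOURCE A (Python) =====
-- def valores(line):
--     num1 = ''
--     num2 = ''
--     num3 = ''
--     cont = 0
--     for caracter in line:
--         if caracter == '#' or caracter == "$" or caracter == "{" or caracter == "}":
--             cont = cont + 1
--             continue
--         if cont == 1:
--             num1 = num1 + caracter
--         elif (cont == 3):
--             num2 = num2 + caracter
--         elif (cont == 5):
--             num3 = num3 + caracter
--     directorio = {'velocidad': num2, 'dist_tot': num1, 'bici': num3}
--     return directorio
-- ===== SOURCE B (Python) =====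
-- def valores(line):
--     # Locate the positions of the delimiter characters, then slice the original
--     # line between consecutive delimiter positions (no field accumulation).
--     pos = [i for i, c in enumerate(line) if c in '#${}']
--     n = len(pos)
--
--     def seg(k):
--         if k - 1 >= n:
--             return ''
--         start = pos[k - 1] + 1
--         stop = pos[k] if k < n else len(line)
--         return line[start:stop]
--
--     return {'velocidad': seg(3), 'dist_tot': seg(1), 'bici': seg(5)}
-- ===== Notes on version B (the rewrite author's own statement) =====
-- stated objective: alternative
-- what changed: Replaced the per-character counting state machine with three string accumulators by a positions-then-slice algorithm: one pass records the delimiter indices, then each requested segment is obtained by slicing the original line between consecutive delimiter positions.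
import Mathlib
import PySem

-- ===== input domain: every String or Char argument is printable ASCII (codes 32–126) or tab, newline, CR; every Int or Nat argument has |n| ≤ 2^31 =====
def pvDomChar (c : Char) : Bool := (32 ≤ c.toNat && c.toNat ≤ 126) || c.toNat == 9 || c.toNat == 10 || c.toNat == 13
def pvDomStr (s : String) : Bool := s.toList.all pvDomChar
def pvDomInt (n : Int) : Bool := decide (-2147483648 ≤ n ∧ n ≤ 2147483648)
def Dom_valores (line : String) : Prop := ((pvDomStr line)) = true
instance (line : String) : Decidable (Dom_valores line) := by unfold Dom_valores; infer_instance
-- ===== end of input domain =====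

-- B replaces A's per-character counting state machine (three accumulators) with a positions-then-slice algorithm: record delimiter indices, then slice the line between consecutive positions (alternative; same cost).


-- ===== PORT A =====
-- A's loop: three accumulators selected by the delimiter counter `cont`.
def valoresLoop : List Char → List Char → List Char → List Char → Int → List Char × List Char × List Char
  | [], n1, n2, n3, _ => (n1, n2, n3)
  | c :: rest, n1, n2, n3, cont =>
    if c = '#' ∨ c = '$' ∨ c = '{' ∨ c = '}' then
      valoresLoop rest n1 n2 n3 (cont + 1)
    else if cont = 1 then valoresLoop rest (n1 ++ [c]) n2 n3 cont
    else if cont = 3 then valoresLoop rest n1 (n2 ++ [c]) n3 cont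
    else if cont = 5 then valoresLoop rest n1 n2 (n3 ++ [c]) cont
    else valoresLoop rest n1 n2 n3 cont

def valores (line : String) : List (String × String) :=
  let r := valoresLoop line.toList [] [] [] 0
  [("velocidad", String.ofList r.2.1), ("dist_tot", String.ofList r.1), ("bici", String.ofList r.2.2)]

-- ===== PORT B =====
-- the comprehension `[i for i, c in enumerate(line) if c in '#${}']`
def delimPositions : List Char → Nat → List Nat
  | [], _ => []
  | c :: rest, i =>
    if c = '#' ∨ c = '$' ∨ c = '{' ∨ c = '}' then i :: delimPositions rest (i + 1)
    else delimPositions rest (i + 1)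

-- Source B's `seg`: slice the line between consecutive delimiter positions.
-- `line[start:stop]` with nonnegative start/stop is exactly drop-then-take (empty if stop ≤ start).
def segB (line : List Char) (pos : List Nat) (k : Nat) : List Char :=
  if pos.length ≤ k - 1 then []
  else
    let start := pos.getD (k - 1) 0 + 1
    let stop := if k < pos.length then pos.getD k 0 else line.length
    (line.drop start).take (stop - start)

def valores_alt (line : String) : List (String × String) :=
  let cs := line.toList
  let pos := delimPositions cs 0
  [("velocidad", String.ofList (segB cs pos 3)),
   ("dist_tot", String.ofList (segB cs pos 1)),
   ("bici", String.ofList (segB cs pos 5))]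

-- ===== PRECONDITION & SPEC =====
def Spec_valores (line : String) (out : List (String × String)) : Prop := out = valores_alt line
instance (line : String) (out : List (String × String)) : Decidable (Spec_valores line out) := by unfold Spec_valores; infer_instance

-- ===== CLAIM (what is proved, stated in full; the proofs are below) =====
def Claim_equal_valores : Prop := ∀ (line : String), Dom_valores line → Spec_valores line (valores line)

-- ===== LEMMAS AND PROOFS =====

-- proof-only: the split of the line on the four delimiters, a common reference point
def splitDelims : List Char → List (List Char)
  | [] => [[]]
  | c :: rest =>
    if c = '#' ∨ c = '$' ∨ c = '{' ∨ c = '}' then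
      [] :: splitDelims rest
    else
      match splitDelims rest with
      | [] => [[c]]
      | f :: fs => (c :: f) :: fs

-- proof-only: field selection with an Int offset, to characterise A's loop
def pickI : List (List Char) → Int → List Char
  | [], _ => []
  | f :: fs, k => if k = 0 then f else pickI fs (k - 1)

theorem pickI_neg : ∀ (fs : List (List Char)) (k : Int), k < 0 → pickI fs k = [] := by
  intro fs
  induction fs with
  | nil => intro k _; rfl
  | cons f fs ih =>
    intro k hk
    simp only [pickI, if_neg (by omega : ¬ k = 0)]
    exact ih (k - 1) (by omega)

theorem pickI_cons_nil (fs : List (List Char)) (k : Int) :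
    pickI ([] :: fs) k = pickI fs (k - 1) := by
  simp only [pickI]
  split_ifs with h
  · rw [pickI_neg fs (k - 1) (by omega)]
  · rfl

theorem pickI_singleton_nil : ∀ (k : Int), pickI [[]] k = [] := by
  intro k
  simp only [pickI]
  split_ifs <;> rfl

theorem pickI_ofNat : ∀ (fs : List (List Char)) (i : Nat), pickI fs (i : Int) = fs.getD i [] := by
  intro fs
  induction fs with
  | nil => intro i; cases i <;> rfl
  | cons f fs ih =>
    intro i
    cases i with
    | zero => rfl
    | succ j =>
      simp only [pickI, List.getD]
      rw [if_neg (by omega : ¬ ((j + 1 : Nat) : Int) = 0)]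
      have h : ((j + 1 : Nat) : Int) - 1 = (j : Int) := by push_cast; ring
      rw [h, ih j]
      rfl

theorem splitDelims_ne_nil : ∀ (cs : List Char), splitDelims cs ≠ [] := by
  intro cs
  cases cs with
  | nil => simp [splitDelims]
  | cons c rest =>
    simp only [splitDelims]
    split_ifs
    · simp
    · cases h : splitDelims rest <;> simp

-- A's loop computes the fields of splitDelims
theorem loop_split : ∀ (cs : List Char) (n1 n2 n3 : List Char) (cont : Int),
    valoresLoop cs n1 n2 n3 cont =
      (n1 ++ pickI (splitDelims cs) (1 - cont),
       n2 ++ pickI (splitDelims cs) (3 - cont),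
       n3 ++ pickI (splitDelims cs) (5 - cont)) := by
  intro cs
  induction cs with
  | nil =>
    intro n1 n2 n3 cont
    simp [valoresLoop, splitDelims, pickI_singleton_nil]
  | cons c rest ih =>
    intro n1 n2 n3 cont
    by_cases hd : c = '#' ∨ c = '$' ∨ c = '{' ∨ c = '}'
    · have hB : splitDelims (c :: rest) = [] :: splitDelims rest := by
        simp [splitDelims, hd]
      simp only [valoresLoop, if_pos hd]
      rw [ih, hB, pickI_cons_nil, pickI_cons_nil, pickI_cons_nil,
          (by ring : (1 : Int) - cont - 1 = 1 - (cont + 1)),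
          (by ring : (3 : Int) - cont - 1 = 3 - (cont + 1)),
          (by ring : (5 : Int) - cont - 1 = 5 - (cont + 1))]
    · obtain ⟨f, fs, hsplit⟩ : ∃ f fs, splitDelims rest = f :: fs := by
        cases h : splitDelims rest with
        | nil => exact absurd h (splitDelims_ne_nil rest)
        | cons f fs => exact ⟨f, fs, rfl⟩
      have hB : splitDelims (c :: rest) = (c :: f) :: fs := by
        simp only [splitDelims, if_neg hd, hsplit]
      rw [hB]
      simp only [valoresLoop, if_neg hd]
      by_cases h1 : cont = 1
      · rw [if_pos h1, ih, hsplit, h1]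
        simp [pickI]
      · rw [if_neg h1]
        by_cases h3 : cont = 3
        · rw [if_pos h3, ih, hsplit, h3]
          simp [pickI]
        · rw [if_neg h3]
          by_cases h5 : cont = 5
          · rw [if_pos h5, ih, hsplit, h5]
            simp [pickI]
          · rw [if_neg h5, ih, hsplit]
            simp only [pickI]
            split_ifs <;> first | rfl | omega

-- positions shift under a larger start index
theorem delimPos_shift : ∀ (cs : List Char) (i : Nat),
    delimPositions cs (i + 1) = (delimPositions cs i).map (· + 1) := by
  intro cs
  induction cs with
  | nil => intro i; rfl
  | cons c rest ih =>
    intro i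
    simp only [delimPositions]
    split_ifs <;> simp [ih]

theorem getD_map_add (P : List Nat) (i : Nat) (h : i < P.length) :
    (P.map (· + 1)).getD i 0 = P.getD i 0 + 1 := by
  simp [List.getD_eq_getElem?_getD, List.getElem?_eq_getElem h,
        List.getElem?_eq_getElem (by simpa using h : i < (P.map (· + 1)).length)]

-- field 0 of the split is the prefix up to the first delimiter
theorem split_head : ∀ (cs : List Char),
    (splitDelims cs).getD 0 [] = cs.take ((delimPositions cs 0).headD cs.length) := by
  intro cs
  induction cs with
  | nil => rfl
  | cons c rest ih =>
    by_cases hd : c = '#' ∨ c = '$' ∨ c = '{' ∨ c = '}'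
    · simp [splitDelims, delimPositions, hd]
    · obtain ⟨f, fs, hsplit⟩ : ∃ f fs, splitDelims rest = f :: fs := by
        cases h : splitDelims rest with
        | nil => exact absurd h (splitDelims_ne_nil rest)
        | cons f fs => exact ⟨f, fs, rfl⟩
      have hB : splitDelims (c :: rest) = (c :: f) :: fs := by
        simp only [splitDelims, if_neg hd, hsplit]
      rw [hB]
      have hP : delimPositions (c :: rest) 0 = (delimPositions rest 0).map (· + 1) := by
        simp only [delimPositions, if_neg hd]
        exact delimPos_shift rest 0
      rw [hP]
      cases hq : delimPositions rest 0 with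
      | nil =>
        simp only [List.map_nil, List.headD_nil, List.length_cons, List.take_succ_cons,
          List.getD_cons_zero]
        rw [List.take_length]
        have := ih; rw [hsplit, hq] at this
        simp only [List.getD_cons_zero, List.headD_nil] at this
        rw [this, List.take_length]
      | cons p ps =>
        simp only [List.map_cons, List.headD_cons, List.take_succ_cons, List.getD_cons_zero]
        have := ih; rw [hsplit, hq] at this
        simp only [List.getD_cons_zero, List.headD_cons] at this
        rw [this]

-- dropping the head position only shifts the field index by one
theorem segB_cons_pos (cs : List Char) (q : Nat) (Q : List Nat) (j : Nat) :
    segB cs (q :: Q) (j + 2) = segB cs Q (j + 1) := by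
  simp only [segB, List.length_cons]
  have e1 : j + 2 - 1 = j + 1 := rfl
  have e2 : j + 1 - 1 = j := rfl
  rw [e1, e2, List.getD_cons_succ]
  by_cases h : Q.length ≤ j
  · rw [if_pos (by omega), if_pos h]
  · rw [if_neg (by omega), if_neg h]
    by_cases h2 : j + 1 < Q.length
    · rw [if_pos (by omega), if_pos h2, List.getD_cons_succ]
    · rw [if_neg (by omega), if_neg h2, List.getD_cons_succ]

-- a non-head character shifts every delimiter position by one; the slice is unchanged
theorem segB_shift (c : Char) (rest : List Char) (P : List Nat) (m : Nat) (_hm : 1 ≤ m) :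
    segB (c :: rest) (P.map (· + 1)) m = segB rest P m := by
  simp only [segB, List.length_map, List.length_cons]
  by_cases h : P.length ≤ m - 1
  · rw [if_pos h, if_pos h]
  · rw [if_neg h, if_neg h]
    have hlt : m - 1 < P.length := by omega
    rw [getD_map_add P (m - 1) hlt]
    have hdrop : ∀ x : Nat, (c :: rest).drop (x + 1 + 1) = rest.drop (x + 1) := by
      intro x; rfl
    rw [hdrop]
    by_cases h2 : m < P.length
    · rw [if_pos h2, if_pos h2, getD_map_add P m h2]
      congr 1
      omega
    · rw [if_neg h2, if_neg h2]
      congr 1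
      omega

-- the slice between delimiter positions k and k+1 is field k+1 of the split
theorem seg_eq : ∀ (cs : List Char) (k : Nat),
    segB cs (delimPositions cs 0) (k + 1) = (splitDelims cs).getD (k + 1) [] := by
  intro cs
  induction cs with
  | nil => intro k; simp [segB, delimPositions, splitDelims]
  | cons c rest ih =>
    intro k
    by_cases hd : c = '#' ∨ c = '$' ∨ c = '{' ∨ c = '}'
    · have hP : delimPositions (c :: rest) 0 = 0 :: (delimPositions rest 0).map (· + 1) := by
        simp only [delimPositions, if_pos hd]
        rw [delimPos_shift rest 0]
      have hS : splitDelims (c :: rest) = [] :: splitDelims rest := by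
        simp [splitDelims, hd]
      rw [hP, hS]
      cases k with
      | zero =>
        -- field 1: the slice from position 0+1 up to the next delimiter or the end
        rw [List.getD_cons_succ, split_head]
        cases hq : delimPositions rest 0 with
        | nil => simp [segB, List.getD]
        | cons p ps => simp [segB, List.getD]
      | succ j =>
        rw [segB_cons_pos, segB_shift c rest _ (j + 1) (by omega), ih j,
          List.getD_cons_succ]
    · obtain ⟨f, fs, hsplit⟩ : ∃ f fs, splitDelims rest = f :: fs := by
        cases h : splitDelims rest with
        | nil => exact absurd h (splitDelims_ne_nil rest)
        | cons f fs => exact ⟨f, fs, rfl⟩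
      have hB : splitDelims (c :: rest) = (c :: f) :: fs := by
        simp only [splitDelims, if_neg hd, hsplit]
      have hP : delimPositions (c :: rest) 0 = (delimPositions rest 0).map (· + 1) := by
        simp only [delimPositions, if_neg hd]
        exact delimPos_shift rest 0
      rw [hP, hB, segB_shift c rest _ (k + 1) (by omega), ih k, hsplit,
        List.getD_cons_succ, List.getD_cons_succ]

-- ===== VERDICT (by name: the statement is the Claim_ definition above) =====
theorem valores_spec : Claim_equal_valores := by
  intro line _
  unfold Spec_valores valores valores_alt
  rw [loop_split]
  have h1 := seg_eq line.toList 0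
  have h3 := seg_eq line.toList 2
  have h5 := seg_eq line.toList 4
  have p1 := pickI_ofNat (splitDelims line.toList) 1
  have p3 := pickI_ofNat (splitDelims line.toList) 3
  have p5 := pickI_ofNat (splitDelims line.toList) 5
  norm_num at p1 p3 p5 h1 h3 h5
  simp [h1, h3, h5, p1, p3, p5]
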